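-- pv_equiv track=rewrite | github.com/Mansoorinho/DrChrono-Challenge | RockCollector.py | get_rock_index
-- ===== SOURCE A (Python) =====
-- def get_rock_index(quantity):
--     Jamie = quantity
--     Ned = sorted(quantity)
--     Geoffrey = [sum(x) for x in zip(Ned,Jamie)]
--     lastNum = 0
--     SortGeof = sorted(Geoffrey)
--     #to find the max occurent quantity
--     for i in SortGeof:
--         num = Geoffrey.count(i)
--         if num >= lastNum:
--             lastNum = num
--             lastFreq = i
--     #to find the index of the max most occurent quantity
--     quantityIndex = 0
--     while quantityIndex < len(Geoffrey):
--         if Geoffrey[quantityIndex] == lastFreq: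
--             lastIndex = quantityIndex
--         quantityIndex += 1
--
--     return lastIndex
-- ===== SOURCE B (Python) =====
-- def get_rock_index(quantity):
--     srt = sorted(quantity)
--     pairs = sorted((a + b, i) for i, (a, b) in enumerate(zip(srt, quantity)))
--     best_count = 0
--     run_val = None
--     run_count = 0
--     for v, i in pairs:
--         run_count = run_count + 1 if v == run_val else 1
--         run_val = v
--         if run_count >= best_count:
--             best_count = run_count
--             best_index = i
--     return best_index
-- ===== Notes on version B (the rewrite author's own statement) =====
-- stated objective: faster
-- what changed: A rescans Geoffrey with .count for every element of a second sorted copy and then re-scans all indices; B sorts the (sum, index) pairs once and finds the winning value and its last index in a single run-length scan over the sorted pairs, with no counting table and no rescans.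
import Mathlib
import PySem

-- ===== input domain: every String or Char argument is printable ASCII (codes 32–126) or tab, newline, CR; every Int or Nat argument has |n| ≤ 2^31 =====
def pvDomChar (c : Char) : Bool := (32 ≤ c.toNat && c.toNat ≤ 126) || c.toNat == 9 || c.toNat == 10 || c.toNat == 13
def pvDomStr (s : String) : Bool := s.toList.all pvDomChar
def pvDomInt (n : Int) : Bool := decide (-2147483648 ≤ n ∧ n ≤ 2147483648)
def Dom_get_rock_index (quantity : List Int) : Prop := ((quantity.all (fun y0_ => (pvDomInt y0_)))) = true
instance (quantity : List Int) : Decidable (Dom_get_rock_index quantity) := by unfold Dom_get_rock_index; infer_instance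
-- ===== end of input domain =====

-- B replaces A's quadratic passes (a .count scan per element, then a full index re-scan) by sorting the
-- (sum, index) pairs once and doing a single run-length scan over the sorted pairs (objective: faster).

-- ===== PORT A =====
def get_rock_index (quantity : List Int) : Int :=
  let Jamie := quantity
  let Ned := PySem.List.sorted quantity (fun x => x) false
  let Geoffrey := (Ned.zip Jamie).map (fun x => x.1 + x.2)
  let SortGeof := PySem.List.sorted Geoffrey (fun x => x) false
  -- for i in SortGeof: lastFreq is unbound before the loop → Option, none = unbound
  let st := SortGeof.foldl
    (fun (s : Int × Option Int) i =>
      let num : Int := PySem.List.count Geoffrey i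
      if s.1 ≤ num then (num, some i) else s)
    ((0 : Int), (none : Option Int))
  match st.2 with
  | none => 0   -- lastFreq unbound: Python raises UnboundLocalError (empty input; excluded by Pre_)
  | some lastFreq =>
    -- while quantityIndex < len(Geoffrey)
    let fin := (PySem.List.pyRange 0 (PySem.List.len Geoffrey) 1).foldl
      (fun (li : Option Int) qi =>
        if PySem.List.pyGetD Geoffrey qi 0 = lastFreq then some qi else li)
      (none : Option Int)
    match fin with
    | some lastIndex => lastIndex
    | none => 0   -- lastIndex unbound: Python raises UnboundLocalError (unreachable when lastFreq ∈ Geoffrey)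

-- ===== PORT B =====
-- the loop body: state = (best_count, run_val, run_count, best_index); best_index/run_val none = unbound/None
def pvStepB (s : Int × Option Int × Int × Option Int) (p : Int × Int) : Int × Option Int × Int × Option Int :=
  let runCount := if some p.1 = s.2.1 then s.2.2.1 + 1 else 1
  if s.1 ≤ runCount then (runCount, some p.1, runCount, some p.2)
  else (s.1, some p.1, runCount, s.2.2.2)

def get_rock_index_alt (quantity : List Int) : Int :=
  let srt := PySem.List.sorted quantity (fun x => x) false
  let pairs := PySem.List.sorted2
    ((PySem.List.enumerate (srt.zip quantity) 0).map (fun p => (p.2.1 + p.2.2, p.1)))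
    (fun x => x.1) (fun x => x.2) false
  let st := pairs.foldl pvStepB ((0 : Int), (none : Option Int), (0 : Int), (none : Option Int))
  match st.2.2.2 with
  | some bestIndex => bestIndex
  | none => 0   -- best_index unbound: Python raises UnboundLocalError (empty input; excluded by Pre_)

-- ===== PRECONDITION & SPEC =====
-- Pre_ excludes only the empty list, on which both A and B raise UnboundLocalError.
def Pre_get_rock_index (quantity : List Int) : Prop := quantity ≠ []
instance (quantity : List Int) : Decidable (Pre_get_rock_index quantity) := by unfold Pre_get_rock_index; infer_instance
def pvWitness_get_rock_index : List Int := [1, 2, 2]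

def Spec_get_rock_index (quantity : List Int) (out : Int) : Prop := out = get_rock_index_alt quantity
instance (quantity : List Int) (out : Int) : Decidable (Spec_get_rock_index quantity out) := by unfold Spec_get_rock_index; infer_instance

-- ===== CLAIM (what is proved, stated in full; the proofs are below) =====
def Claim_equal_get_rock_index : Prop := ∀ (quantity : List Int), Dom_get_rock_index quantity → Pre_get_rock_index quantity → Spec_get_rock_index quantity (get_rock_index quantity)

-- ===== LEMMAS AND PROOFS =====

-- 'u is at most v in the (count, value) order over the value list G'
def pvLexLe (G : List Int) (u v : Int) : Prop :=
  (G.count u : Int) < (G.count v : Int) ∨ ((G.count u : Int) = (G.count v : Int) ∧ u ≤ v)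

-- A's first loop returns a (count,value)-lex-maximal element of G
lemma pvFoldA_spec (G : List Int) (L : List Int) (m : Int)
    (hL : L.Pairwise (· ≤ ·)) (hm : ∀ u ∈ L, m ≤ u) :
    ∃ r, L.foldl
        (fun (s : Int × Option Int) i =>
          if s.1 ≤ (PySem.List.count G i : Int) then ((PySem.List.count G i : Int), some i) else s)
        (((PySem.List.count G m : Int)), some m)
      = (((PySem.List.count G r : Int)), some r)
      ∧ r ∈ m :: L ∧ ∀ u ∈ m :: L, pvLexLe G u r := by
  simp only [PySem.List.count_eq] at *
  induction L generalizing m with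
  | nil =>
    refine ⟨m, rfl, List.mem_cons_self, ?_⟩
    intro u hu; simp at hu; subst hu; exact Or.inr ⟨rfl, le_refl _⟩
  | cons i L ih =>
    rw [List.pairwise_cons] at hL
    simp only [List.foldl_cons]
    by_cases h : ((List.count m G : Int)) ≤ ((List.count i G : Int))
    · rw [if_pos h]
      obtain ⟨r, heq, hmem, hmax⟩ := ih i hL.2 hL.1
      refine ⟨r, heq, ?_, ?_⟩
      · rcases List.mem_cons.mp hmem with h1 | h1
        · exact List.mem_cons_of_mem _ (h1 ▸ List.mem_cons_self)
        · exact List.mem_cons_of_mem _ (List.mem_cons_of_mem _ h1)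
      · intro u hu
        rcases List.mem_cons.mp hu with rfl | hu'
        · have hir := hmax i (List.mem_cons_self)
          have hmi : u ≤ i := hm i (List.mem_cons_self)
          unfold pvLexLe at hir ⊢
          rcases hir with h2 | ⟨h2, h3⟩
          · left; omega
          · rcases lt_or_eq_of_le h with h4 | h4
            · left; omega
            · right; exact ⟨by omega, le_trans hmi h3⟩
        · exact hmax u hu'
    · rw [if_neg h]
      have hm' : ∀ u ∈ L, m ≤ u := fun u hu => hm u (List.mem_cons_of_mem _ hu)
      obtain ⟨r, heq, hmem, hmax⟩ := ih m hL.2 hm'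
      refine ⟨r, heq, ?_, ?_⟩
      · rcases List.mem_cons.mp hmem with h1 | h1
        · exact h1 ▸ List.mem_cons_self
        · exact List.mem_cons_of_mem _ (List.mem_cons_of_mem _ h1)
      · intro u hu
        rcases List.mem_cons.mp hu with rfl | hu'
        · exact hmax u (List.mem_cons_self)
        · rcases List.mem_cons.mp hu' with rfl | hu''
          · have hmr := hmax m (List.mem_cons_self)
            unfold pvLexLe at hmr ⊢
            left; omega
          · exact hmax u (List.mem_cons_of_mem _ hu'')

lemma pvLex_unique (G : List Int) (w w' : Int) (hw : w ∈ G) (hw' : w' ∈ G)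
    (h1 : ∀ u ∈ G, pvLexLe G u w) (h2 : ∀ u ∈ G, pvLexLe G u w') : w = w' := by
  have a := h1 w' hw'
  have b := h2 w hw
  unfold pvLexLe at a b
  omega

-- A's while loop over indices is the fold over enumerate
lemma pvIdxLoop (xs : List Int) (w : Int) (init : Option Int) :
    (PySem.List.pyRange 0 (PySem.List.len xs) 1).foldl
        (fun li j => if PySem.List.pyGetD xs j 0 = w then some j else li) init
      = (PySem.List.enumerate xs 0).foldl (fun li p => if p.2 = w then some p.1 else li) init := by
  rw [PySem.List.enumerate_eq_map_pyRange xs 0, List.foldl_map]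

-- enumerate of a mapped list
lemma pvEnumMap {α β : Type} (f : α → β) (xs : List α) (s : Int) :
    PySem.List.enumerate (xs.map f) s = (PySem.List.enumerate xs s).map (fun p => (p.1, f p.2)) := by
  induction xs generalizing s with
  | nil => simp [PySem.List.enumerate_nil]
  | cons x xs ih => simp [PySem.List.enumerate_cons, ih]

-- last value written by 'if p.1 == w: out = p.2'
def pvLast (M : List (Int × Int)) (w : Int) : Option Int :=
  M.foldl (fun li p => if p.1 = w then some p.2 else li) none

lemma pvLast_append (M : List (Int × Int)) (p : Int × Int) (w : Int) :
    pvLast (M ++ [p]) w = if p.1 = w then some p.2 else pvLast M w := by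
  unfold pvLast
  rw [List.foldl_append]
  rfl

lemma pvLast_some (M : List (Int × Int)) (w : Int) (h : w ∈ M.map Prod.fst) :
    ∃ j, pvLast M w = some j := by
  induction M using List.reverseRecOn with
  | nil => simp at h
  | append_singleton M p ih =>
    rw [pvLast_append]
    by_cases hp : p.1 = w
    · exact ⟨p.2, by rw [if_pos hp]⟩
    · rw [if_neg hp]
      apply ih
      simp only [List.map_append, List.mem_append] at h
      rcases h with h | h
      · exact h
      · simp at h; exact absurd h.symm hp

lemma pvLast_spec (M : List (Int × Int)) (w j : Int)
    (hpw : M.Pairwise (fun p q => p.1 = w → q.1 = w → p.2 ≤ q.2))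
    (h : pvLast M w = some j) : (w, j) ∈ M ∧ ∀ p ∈ M, p.1 = w → p.2 ≤ j := by
  induction M using List.reverseRecOn with
  | nil => simp [pvLast] at h
  | append_singleton M p ih =>
    have hpw' : M.Pairwise (fun p q => p.1 = w → q.1 = w → p.2 ≤ q.2) :=
      (List.pairwise_append.mp hpw).1
    have hcross : ∀ a ∈ M, a.1 = w → p.1 = w → a.2 ≤ p.2 := by
      intro a ha
      exact (List.pairwise_append.mp hpw).2.2 a ha p (List.mem_singleton_self p)
    rw [pvLast_append] at h
    by_cases hp : p.1 = w
    · rw [if_pos hp] at h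
      injection h with h
      subst h
      refine ⟨?_, ?_⟩
      · rw [← hp]; exact List.mem_append_right _ (List.mem_singleton_self p)
      · intro q hq hq1
        rcases List.mem_append.mp hq with hq | hq
        · exact hcross q hq hq1 hp
        · simp at hq; subst hq; exact le_refl _
    · rw [if_neg hp] at h
      obtain ⟨hmem, hbd⟩ := ih hpw' h
      refine ⟨List.mem_append_left _ hmem, ?_⟩
      intro q hq hq1
      rcases List.mem_append.mp hq with hq | hq
      · exact hbd q hq hq1
      · simp at hq; subst hq; exact absurd hq1 hp

-- insertBy with a lex comparator keeps the list pairwise-ordered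
lemma pvPairwise_insertBy {α : Type} (before : α → α → Bool) (R : α → α → Prop)
    (h1 : ∀ a b, before a b = true → R a b) (h2 : ∀ a b, before a b = false → R b a)
    (h3 : ∀ a b c, R a b → R b c → R a c) (x : α) :
    ∀ ys : List α, ys.Pairwise R → (PySem.List.insertBy before x ys).Pairwise R := by
  intro ys
  induction ys with
  | nil => intro _; simp [PySem.List.insertBy]
  | cons y ys ih =>
    intro hpw
    rw [List.pairwise_cons] at hpw
    show (if before x y = true then x :: y :: ys else y :: PySem.List.insertBy before x ys).Pairwise R
    by_cases hb : before x y = true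
    · rw [if_pos hb]
      refine List.pairwise_cons.mpr ⟨?_, List.pairwise_cons.mpr hpw⟩
      intro z hz
      rcases List.mem_cons.mp hz with rfl | hz'
      · exact h1 x z hb
      · exact h3 x y z (h1 x y hb) (hpw.1 z hz')
    · rw [if_neg hb]
      refine List.pairwise_cons.mpr ⟨?_, ih hpw.2⟩
      intro z hz
      rcases (PySem.List.mem_insertBy before x z ys).mp hz with rfl | hz'
      · exact h2 z y (by simpa using hb)
      · exact hpw.1 z hz'

-- sorted2 on (value, index) pairs is pairwise lexicographically ≤
lemma pvPairwise_sorted2 (xs : List (Int × Int)) :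
    (PySem.List.sorted2 xs (fun x => x.1) (fun x => x.2) false).Pairwise
      (fun p q => p.1 < q.1 ∨ (p.1 = q.1 ∧ p.2 ≤ q.2)) := by
  show (xs.foldl (fun acc x => PySem.List.insertBy _ x acc) []).Pairwise _
  generalize hacc : ([] : List (Int × Int)) = acc
  have hpw : acc.Pairwise (fun p q : Int × Int => p.1 < q.1 ∨ (p.1 = q.1 ∧ p.2 ≤ q.2)) := by
    rw [← hacc]; exact List.Pairwise.nil
  clear hacc
  induction xs generalizing acc with
  | nil => exact hpw
  | cons x xs ih =>
    refine ih _ ?_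
    refine pvPairwise_insertBy _ _ ?_ ?_ ?_ x acc hpw
    · intro a b h
      simp at h
      omega
    · intro a b h
      simp at h
      omega
    · intro a b c hab hbc
      omega

-- the run-length fold over a lex-sorted pair list computes the lex-max value's count and last index
lemma pvFoldB_spec (P : List (Int × Int))
    (hpw : P.Pairwise (fun p q => p.1 < q.1 ∨ (p.1 = q.1 ∧ p.2 ≤ q.2))) (hne : P ≠ []) :
    ∃ (v w : Int),
      (P.foldl pvStepB (0, none, 0, none)).2.1 = some v ∧
      v ∈ P.map Prod.fst ∧ (∀ u ∈ P.map Prod.fst, u ≤ v) ∧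
      (P.foldl pvStepB (0, none, 0, none)).2.2.1 = ((P.map Prod.fst).count v : Int) ∧
      w ∈ P.map Prod.fst ∧ (∀ u ∈ P.map Prod.fst, pvLexLe (P.map Prod.fst) u w) ∧
      (P.foldl pvStepB (0, none, 0, none)).1 = ((P.map Prod.fst).count w : Int) ∧
      (P.foldl pvStepB (0, none, 0, none)).2.2.2 = pvLast P w := by
  induction P using List.reverseRecOn with
  | nil => exact absurd rfl hne
  | append_singleton P p ih =>
    rcases List.pairwise_append.mp hpw with ⟨hpwP, -, hcross⟩
    have hple : ∀ u ∈ P.map Prod.fst, u ≤ p.1 := by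
      intro u hu
      obtain ⟨a, ha, rfl⟩ := List.mem_map.mp hu
      have := hcross a ha p (List.mem_singleton_self p)
      omega
    rcases P with _ | ⟨p0, P0⟩
    · -- base: P = [p]
      refine ⟨p.1, p.1, ?_⟩
      simp [pvStepB, pvLast, pvLexLe, List.count_cons]
    · -- step: P ≠ []
      set P := p0 :: P0 with hP
      obtain ⟨v, w, hv, hvmem, hvmax, hrc, hwmem, hwmax, hbc, hbi⟩ :=
        ih hpwP (by simp [hP])
      rcases hFP : P.foldl pvStepB (0, (none : Option Int), 0, (none : Option Int))
        with ⟨a, rv, rc, bi⟩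
      rw [hFP] at hv hrc hbc hbi
      simp only at hv hrc hbc hbi
      subst hv hrc hbc hbi
      have hfold : (P ++ [p]).foldl pvStepB (0, (none : Option Int), 0, (none : Option Int))
          = pvStepB (((P.map Prod.fst).count w : Int), some v, ((P.map Prod.fst).count v : Int),
              pvLast P w) p := by
        rw [List.foldl_append, hFP]
        rfl
      have hfst : (P ++ [p]).map Prod.fst = P.map Prod.fst ++ [p.1] := by
        simp
      have hcnt_p : ((P ++ [p]).map Prod.fst).count p.1 = (P.map Prod.fst).count p.1 + 1 := by
        simp [hfst, List.count_append]
      have hcnt_ne : ∀ u, u ≠ p.1 → ((P ++ [p]).map Prod.fst).count u = (P.map Prod.fst).count u := by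
        intro u hu
        simp [hfst, List.count_append, Ne.symm hu]
      have hmem' : ∀ u, u ∈ (P ++ [p]).map Prod.fst ↔ (u ∈ P.map Prod.fst ∨ u = p.1) := by
        intro u; simp [hfst]
      -- the new running count is the count of p.1 in the extended value list
      have hrc' : (if some p.1 = some v then ((P.map Prod.fst).count v : Int) + 1 else 1)
          = (((P ++ [p]).map Prod.fst).count p.1 : Int) := by
        by_cases hvp : p.1 = v
        · subst hvp
          rw [if_pos rfl, hcnt_p]
          push_cast
          ring
        · rw [if_neg (by simpa using hvp), hcnt_p]
          have hnotin : p.1 ∉ P.map Prod.fst := by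
            intro hin
            exact hvp (le_antisymm (hvmax p.1 hin) (hple v hvmem))
          rw [List.count_eq_zero_of_not_mem hnotin]
          simp
      have hvle' : ∀ u ∈ (P ++ [p]).map Prod.fst, u ≤ p.1 := by
        intro u hu
        rcases (hmem' u).mp hu with h | rfl
        · exact hple u h
        · exact le_refl _
      -- case split on the best-count update
      by_cases hcond : ((P.map Prod.fst).count w : Int)
          ≤ (if some p.1 = some v then ((P.map Prod.fst).count v : Int) + 1 else 1)
      · refine ⟨p.1, p.1, ?_, ?_, hvle', ?_, ?_, ?_, ?_, ?_⟩
        · rw [hfold]; simp only [pvStepB]; rw [if_pos hcond]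
        · exact (hmem' p.1).mpr (Or.inr rfl)
        · rw [hfold]; simp only [pvStepB]; rw [if_pos hcond]; exact hrc'
        · exact (hmem' p.1).mpr (Or.inr rfl)
        · intro u hu
          unfold pvLexLe
          have hle : (((P ++ [p]).map Prod.fst).count u : Int)
              ≤ (((P ++ [p]).map Prod.fst).count p.1 : Int) := by
            by_cases hup : u = p.1
            · subst hup; exact le_refl _
            · rw [hcnt_ne u hup]
              have h1 : ((P.map Prod.fst).count u : Int) ≤ ((P.map Prod.fst).count w : Int) := by
                rcases (hmem' u).mp hu with h | h
                · have := hwmax u h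
                  unfold pvLexLe at this
                  omega
                · exact absurd h hup
              rw [hrc'] at hcond
              omega
          rcases lt_or_eq_of_le hle with h | h
          · exact Or.inl h
          · exact Or.inr ⟨h, hvle' u hu⟩
        · rw [hfold]; simp only [pvStepB]; rw [if_pos hcond]; exact hrc'
        · rw [hfold]; simp only [pvStepB]; rw [if_pos hcond, pvLast_append, if_pos rfl]
      · -- best unchanged; the old winner w stays the winner
        have hwp : w ≠ p.1 := by
          intro h
          subst h
          rw [hrc'] at hcond
          rw [hcnt_p] at hcond
          push_cast at hcond
          omega
        refine ⟨p.1, w, ?_, ?_, hvle', ?_, ?_, ?_, ?_, ?_⟩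
        · rw [hfold]; simp only [pvStepB]; rw [if_neg hcond]
        · exact (hmem' p.1).mpr (Or.inr rfl)
        · rw [hfold]; simp only [pvStepB]; rw [if_neg hcond]; exact hrc'
        · exact (hmem' w).mpr (Or.inl hwmem)
        · intro u hu
          unfold pvLexLe
          rw [hcnt_ne w hwp]
          rw [hrc'] at hcond
          by_cases hup : u = p.1
          · subst hup
            left
            omega
          · rw [hcnt_ne u hup]
            rcases (hmem' u).mp hu with h | h
            · have := hwmax u h
              unfold pvLexLe at this
              omega
            · exact absurd h hup
        · rw [hfold]; simp only [pvStepB]; rw [if_neg hcond]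
          simp only
          rw [hcnt_ne w hwp]
        · rw [hfold]; simp only [pvStepB]; rw [if_neg hcond]
          simp only
          rw [pvLast_append, if_neg (Ne.symm hwp)]

-- values of the pair list = Geoffrey
lemma pvEfst (Z : List (Int × Int)) :
    ((PySem.List.enumerate Z 0).map (fun p => (p.2.1 + p.2.2, p.1))).map Prod.fst
      = Z.map (fun x => x.1 + x.2) := by
  rw [List.map_map]
  have : (Prod.fst ∘ fun p : Int × (Int × Int) => (p.2.1 + p.2.2, p.1))
      = (fun x : Int × Int => x.1 + x.2) ∘ Prod.snd := rfl
  rw [this, ← List.map_map]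
  rw [show (PySem.List.enumerate Z 0).map Prod.snd = Z from PySem.List.map_snd_enumerate Z 0]

lemma pvMain (q : List Int) (hq : q ≠ []) : get_rock_index q = get_rock_index_alt q := by
  unfold get_rock_index get_rock_index_alt
  simp only []
  set Z := (PySem.List.sorted q (fun x => x) false).zip q with hZdef
  set G := Z.map (fun x => x.1 + x.2) with hGdef
  set E := (PySem.List.enumerate Z 0).map (fun p => (p.2.1 + p.2.2, p.1)) with hEdef
  set S := PySem.List.sorted2 E (fun x => x.1) (fun x => x.2) false with hSdef
  have hZ : Z ≠ [] := by
    simp only [hZdef, ne_eq, List.zip_eq_nil_iff, PySem.List.sorted_eq_nil_iff]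
    simp [hq]
  have hG : G ≠ [] := by simp [hGdef, hZ]
  have hE : E ≠ [] := by
    simp only [hEdef, ne_eq, List.map_eq_nil_iff]
    cases hz : Z with
    | nil => exact absurd hz hZ
    | cons z zs => simp [PySem.List.enumerate_cons]
  have hEfst : E.map Prod.fst = G := pvEfst Z
  have hperm : S.Perm E := PySem.List.sorted2_perm E _ _ false
  have hS : S ≠ [] := by intro h; rw [h] at hperm; exact hE hperm.symm.eq_nil
  have hfsperm : (S.map Prod.fst).Perm G := hEfst ▸ hperm.map Prod.fst
  -- B side: run-length scan over the sorted pairs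
  obtain ⟨v, w, hv, hvmem, hvmax, hrc, hwmem, hwmax, hbc, hbi⟩ :=
    pvFoldB_spec S (pvPairwise_sorted2 E) hS
  have hwG : w ∈ G := hfsperm.mem_iff.mp hwmem
  have hcnt : ∀ u, (S.map Prod.fst).count u = G.count u := fun u => hfsperm.count_eq u
  have hwmaxG : ∀ u ∈ G, pvLexLe G u w := by
    intro u hu
    have := hwmax u (hfsperm.mem_iff.mpr hu)
    unfold pvLexLe at this ⊢
    rw [hcnt u, hcnt w] at this
    exact this
  -- A side: the count-scan over sorted Geoffrey finds the lex-max value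
  obtain ⟨a, T, hSG⟩ : ∃ a T, PySem.List.sorted G (fun x => x) false = a :: T := by
    cases h : PySem.List.sorted G (fun x => x) false with
    | nil => exact absurd ((PySem.List.sorted_eq_nil_iff G _ false).mp h) hG
    | cons a T => exact ⟨a, T, rfl⟩
  have hpwG := PySem.List.sorted_pairwise G (fun x => x)
  rw [hSG] at hpwG
  rw [List.pairwise_cons] at hpwG
  obtain ⟨r, hrEq, hrMem, hrMax⟩ := pvFoldA_spec G T a hpwG.2 hpwG.1
  rw [hSG, List.foldl_cons,
    if_pos (by positivity : (0:Int) ≤ (PySem.List.count G a : Int)), hrEq]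
  dsimp only
  have hrG : r ∈ G := (PySem.List.mem_sorted G (fun x => x) false r).mp (hSG ▸ hrMem)
  have hrMaxG : ∀ u ∈ G, pvLexLe G u r := fun u hu =>
    hrMax u (hSG ▸ (PySem.List.mem_sorted G (fun x => x) false u).mpr hu)
  have hrw : r = w := pvLex_unique G r w hrG hwG hrMaxG hwmaxG
  subst hrw
  -- A's index loop is the last-index fold over E
  rw [pvIdxLoop]
  have hAloop : (PySem.List.enumerate G 0).foldl
      (fun (li : Option Int) p => if p.2 = r then some p.1 else li) none = pvLast E r := by
    rw [hGdef, pvEnumMap, List.foldl_map, hEdef, pvLast, List.foldl_map]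
  rw [hAloop]
  -- both are the unique maximal index of r
  obtain ⟨jE, hjE⟩ := pvLast_some E r (hEfst ▸ hwG)
  obtain ⟨jS, hjS⟩ := pvLast_some S r hwmem
  have hpwE : E.Pairwise (fun p q => p.1 = r → q.1 = r → p.2 ≤ q.2) := by
    rw [hEdef]
    rw [List.pairwise_map]
    exact (PySem.List.pairwise_lt_enumerate Z 0).imp (by intro a b h _ _; simp; omega)
  have hpwS : S.Pairwise (fun p q => p.1 = r → q.1 = r → p.2 ≤ q.2) :=
    (pvPairwise_sorted2 E).imp (by intro a b h h1 h2; omega)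
  obtain ⟨hmemE, hbdE⟩ := pvLast_spec E r jE hpwE hjE
  obtain ⟨hmemS, hbdS⟩ := pvLast_spec S r jS hpwS hjS
  have hj : jE = jS :=
    le_antisymm (hbdS (r, jE) (hperm.mem_iff.mpr hmemE) rfl)
      (hbdE (r, jS) (hperm.mem_iff.mp hmemS) rfl)
  rw [hjE, hbi, hjS, hj]

-- ===== VERDICT (by name: the statement is the Claim_ definition above) =====
theorem get_rock_index_spec : Claim_equal_get_rock_index := by
  intro quantity _ hpre
  exact pvMain quantity hpre
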